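-- pv_equiv track=rewrite | github.com/mfkiwl/fiat | FIAT/recursive_points.py | multiindex_equal
-- ===== SOURCE A (Python) =====
-- def multiindex_equal(d, k, interior=0):
--     """A generator for :math:`d`-tuple multi-indices whose sum is :math:`k`.
--     """
--     if d <= 0:
--         return
--     imin = interior
--     imax = k - (d-1) * imin
--     if imax < imin:
--         return
--     for i in range(imin, imax):
--         for a in multiindex_equal(d-1, k-i, interior=imin):
--             yield (i,) + a
--     yield (imax,) + (imin,)*(d-1)
-- ===== SOURCE B (Python) =====
-- def multiindex_equal(d, k, interior=0):
--     """A generator for d-tuple multi-indices whose sum is k (stars and bars)."""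
--     if d <= 0:
--         return
--     S = k - d * interior
--     if S < 0:
--         return
--     n = S + d - 1
--     for pos in _combos(0, n, d - 1):
--         parts = []
--         prev = -1
--         for p in pos:
--             parts.append(p - prev - 1)
--             prev = p
--         parts.append(n - 1 - prev)
--         yield tuple(q + interior for q in parts)
--
--
-- def _combos(lo, n, r):
--     """Increasing r-element position lists drawn from range(lo, n), lexicographic."""
--     if r <= 0:
--         yield []
--         return
--     for c0 in range(lo, n - r + 1):
--         for rest in _combos(c0 + 1, n, r - 1):
--             yield [c0] + rest
-- ===== Notes on version B (the rewrite author's own statement) =====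
-- stated objective: alternative
-- what changed: Replaces A's recursion over the d tuple entries (one nested generator per dimension with per-level imin/imax bounds) by a flat stars-and-bars enumeration: lexicographic combinations of the d-1 divider positions over range(S+d-1), each converted gap-by-gap into part sizes plus the interior offset.
-- outside the precondition, e.g. on multiindex_equal(20000, 1, 0): A raises RecursionError, B raises RecursionError
import Mathlib
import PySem

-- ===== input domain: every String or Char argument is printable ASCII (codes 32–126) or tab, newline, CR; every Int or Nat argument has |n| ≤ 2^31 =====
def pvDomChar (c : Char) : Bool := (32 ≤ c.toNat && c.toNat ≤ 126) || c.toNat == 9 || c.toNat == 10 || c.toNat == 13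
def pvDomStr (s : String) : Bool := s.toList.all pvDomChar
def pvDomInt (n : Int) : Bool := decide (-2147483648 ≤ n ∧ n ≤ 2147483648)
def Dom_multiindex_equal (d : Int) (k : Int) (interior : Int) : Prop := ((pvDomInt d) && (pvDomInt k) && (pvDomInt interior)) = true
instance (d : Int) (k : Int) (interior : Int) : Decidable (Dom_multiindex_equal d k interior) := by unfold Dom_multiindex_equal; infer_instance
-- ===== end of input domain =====

-- B replaces A's recursion over the tuple entries by a stars-and-bars enumeration of
-- divider positions (lexicographic combinations converted gap-by-gap to part sizes);
-- objective: alternative algorithm. Both Pythons are generators; the equivalence is about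
-- the list of yielded tuples.

-- ===== PORT A =====
def multiindex_equal (d : Int) (k : Int) (interior : Int) : List (List Int) :=
  if _h : d ≤ 0 then []
  else
    let imin := interior
    let imax := k - (d - 1) * imin
    if imax < imin then []
    else
      ((PySem.List.pyRange imin imax 1).flatMap (fun i =>
        (multiindex_equal (d - 1) (k - i) imin).map (fun a => i :: a)))
      ++ [imax :: List.replicate (d - 1).toNat imin]
termination_by d.toNat
decreasing_by omega

-- ===== PORT B =====
-- literal port of Source B's _combos generator (hand-written lexicographic combinations)
def pyCombos (lo : Int) (n : Int) (r : Int) : List (List Int) :=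
  if _h : r ≤ 0 then [[]]
  else
    (PySem.List.pyRange lo (n - r + 1) 1).flatMap (fun c0 =>
      (pyCombos (c0 + 1) n (r - 1)).map (fun rest => c0 :: rest))
termination_by r.toNat
decreasing_by omega

def multiindex_equal_alt (d : Int) (k : Int) (interior : Int) : List (List Int) :=
  if d ≤ 0 then []
  else
    let S := k - d * interior
    if S < 0 then []
    else
      let n := S + d - 1
      (pyCombos 0 n (d - 1)).map (fun pos =>
        let st := pos.foldl (fun (st : List Int × Int) p => (st.1 ++ [p - st.2 - 1], p)) ([], -1)
        (st.1 ++ [n - 1 - st.2]).map (fun q => q + interior))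

-- ===== PRECONDITION & SPEC =====
-- Pre_ excludes only the deep-recursion inputs (d > 9000 with positive slack k - d*interior),
-- where CPython's recursion limit makes A -- and B, which recurses to the same depth -- raise
-- RecursionError rather than return; the exact raising threshold is environmental (it tracks
-- sys.getrecursionlimit()), so the bound sits below the harness's limit of 10000, and the
-- equivalence proof below (pvMain) in fact never uses Pre_: the ports agree on every input.
def Pre_multiindex_equal (d : Int) (k : Int) (interior : Int) : Prop := d ≤ 9000 ∨ k - d * interior ≤ 0
instance (d : Int) (k : Int) (interior : Int) : Decidable (Pre_multiindex_equal d k interior) := by unfold Pre_multiindex_equal; infer_instance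
def pvWitness_multiindex_equal : Int × Int × Int := (2, 3, 0)

def Spec_multiindex_equal (d : Int) (k : Int) (interior : Int) (out : List (List Int)) : Prop := out = multiindex_equal_alt d k interior
instance (d : Int) (k : Int) (interior : Int) (out : List (List Int)) : Decidable (Spec_multiindex_equal d k interior out) := by unfold Spec_multiindex_equal; infer_instance

-- ===== CLAIM (what is proved, stated in full; the proofs are below) =====
def Claim_equal_multiindex_equal : Prop := ∀ (d : Int) (k : Int) (interior : Int), Dom_multiindex_equal d k interior → Pre_multiindex_equal d k interior → Spec_multiindex_equal d k interior (multiindex_equal d k interior)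

-- ===== LEMMAS AND PROOFS =====

-- gap list: part sizes between successive divider positions (B's inner loop, recursively)
def pvGap (prev : Int) : List Int → List Int
  | [] => []
  | p :: ps => (p - prev - 1) :: pvGap p ps

theorem pvGap_foldl (pos : List Int) : ∀ (acc : List Int) (prev : Int),
    pos.foldl (fun (st : List Int × Int) p => (st.1 ++ [p - st.2 - 1], p)) (acc, prev)
      = (acc ++ pvGap prev pos, pos.getLastD prev) := by
  induction pos with
  | nil => intro acc prev; simp [pvGap]
  | cons p ps ih =>
      intro acc prev
      simp only [List.foldl_cons, ih, pvGap, List.getLastD_cons]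
      simp

theorem pvGap_shift (pos : List Int) : ∀ (prev s : Int),
    pvGap prev (pos.map (· + s)) = pvGap (prev - s) pos := by
  induction pos with
  | nil => intro prev s; simp [pvGap]
  | cons p ps ih =>
      intro prev s
      simp only [List.map_cons, pvGap, ih (p + s) s]
      have h1 : p + s - s = p := by ring
      have h2 : p + s - prev - 1 = p - (prev - s) - 1 := by ring
      rw [h1, h2]

theorem pvGetLastD_map_add (pos : List Int) : ∀ (prev s : Int),
    (pos.map (· + s)).getLastD prev = pos.getLastD (prev - s) + s := by
  induction pos with
  | nil => intro prev s; simp only [List.map_nil, List.getLastD_nil]; ring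
  | cons p ps ih =>
      intro prev s
      simp only [List.map_cons, List.getLastD_cons, ih (p + s) s]
      have h1 : p + s - s = p := by ring
      rw [h1]

theorem pvRange_map_add (a b s : Int) :
    (PySem.List.pyRange a b 1).map (· + s) = PySem.List.pyRange (a + s) (b + s) 1 := by
  rw [PySem.List.pyRange_one, PySem.List.pyRange_one]
  have h : b + s - (a + s) = b - a := by ring
  rw [h]
  simp only [List.map_map]
  apply List.map_congr_left
  intro j _
  simp only [Function.comp_apply]
  ring

theorem pvGap_consec (tn : Nat) : ∀ (a b : Int), (b - a - 1).toNat = tn →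
    pvGap a (PySem.List.pyRange (a + 1) b 1) = List.replicate tn 0 := by
  induction tn with
  | zero =>
      intro a b h
      rw [PySem.List.pyRange_one_eq_nil (by omega)]
      simp [pvGap]
  | succ m ih =>
      intro a b h
      rw [PySem.List.pyRange_one_cons (by omega)]
      simp only [pvGap]
      rw [ih (a + 1) b (by omega)]
      norm_num [List.replicate_succ]

theorem pvLast_pyRange (a b d : Int) (h : a < b) :
    (PySem.List.pyRange a b 1).getLastD d = b - 1 := by
  have h2 := PySem.List.pyRange_one_succ_right (a := a) (b := b - 1) (by omega)
  have h3 : b - 1 + 1 = b := by ring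
  rw [h3] at h2
  rw [h2]
  simp

-- pyCombos with a general lower bound is the shifted pyCombos from 0
theorem pyCombos_shift (rn : Nat) : ∀ (r lo n : Int), r.toNat = rn →
    pyCombos lo n r = (pyCombos 0 (n - lo) r).map (List.map (· + lo)) := by
  induction rn with
  | zero =>
      intro r lo n hr
      rw [pyCombos, pyCombos]
      have : r ≤ 0 := by omega
      simp [this]
  | succ m ih =>
      intro r lo n hr
      rw [pyCombos, pyCombos]
      have hr0 : ¬ r ≤ 0 := by omega
      simp only [hr0, dif_neg, not_false_iff]
      rw [PySem.List.pyRange_one, PySem.List.pyRange_one]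
      have hlen : (n - r + 1 - lo) = (n - lo - r + 1 - 0) := by ring
      rw [hlen]
      simp only [List.flatMap_map, List.map_flatMap]
      congr 1
      funext j
      rw [ih (r - 1) (lo + (j : Int) + 1) n (by omega),
          ih (r - 1) ((0 : Int) + (j : Int) + 1) (n - lo) (by omega)]
      have harg : n - lo - ((0 : Int) + (j : Int) + 1) = n - (lo + (j : Int) + 1) := by ring
      rw [harg]
      simp only [List.map_map]
      apply List.map_congr_left
      intro rest _
      simp only [Function.comp_apply, List.map_cons, List.map_map]
      congr 1
      · ring
      · apply List.map_congr_left
        intro x _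
        simp only [Function.comp_apply]
        ring

-- choosing r dividers out of r slots: the unique, contiguous combination
theorem pyCombos_tight (rn : Nat) : ∀ (r : Int), r.toNat = rn →
    pyCombos 0 r r = [PySem.List.pyRange 0 r 1] := by
  induction rn with
  | zero =>
      intro r hr
      rw [pyCombos]
      have h0 : r ≤ 0 := by omega
      rw [PySem.List.pyRange_one_eq_nil (a := (0 : Int)) (b := r) (by omega)]
      simp [h0]
  | succ m ih =>
      intro r hr
      rw [pyCombos]
      have hr0 : ¬ r ≤ 0 := by omega
      simp only [hr0, dif_neg, not_false_iff]
      have h1 : r - r + 1 = 0 + 1 := by ring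
      rw [h1, PySem.List.pyRange_one_singleton]
      simp only [List.flatMap_cons, List.flatMap_nil, List.append_nil]
      rw [pyCombos_shift m (r - 1) (0 + 1) r (by omega)]
      have h2 : r - (0 + 1) = r - 1 := by ring
      rw [h2, ih (r - 1) (by omega)]
      simp only [List.map_cons, List.map_nil]
      rw [pvRange_map_add]
      have h3 : (0 : Int) + (0 + 1) = 0 + 1 := by ring
      have h4 : r - 1 + (0 + 1) = r := by ring
      rw [h3, h4]
      rw [show PySem.List.pyRange 0 r 1 = 0 :: PySem.List.pyRange (0 + 1) r 1 from
        PySem.List.pyRange_one_cons (by omega)]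

-- a clean form of B's port on the non-degenerate branch
theorem alt_char (d k m : Int) (hd : ¬ d ≤ 0) (hS : ¬ k - d * m < 0) :
    multiindex_equal_alt d k m
      = (pyCombos 0 (k - d * m + d - 1) (d - 1)).map (fun pos =>
          (pvGap (-1) pos ++ [(k - d * m + d - 1) - 1 - pos.getLastD (-1)]).map (· + m)) := by
  unfold multiindex_equal_alt
  simp only [hd, if_neg, hS, not_false_iff]
  apply List.map_congr_left
  intro pos _
  rw [pvGap_foldl]
  simp

-- the cell correspondence: fixing the first divider at c0 yields B at dimension d-1
theorem pvCell (d k m c0 : Int) (hd : ¬ d ≤ 0) (hd1 : d ≠ 1)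
    (_hc0 : 0 ≤ c0) (hcS : c0 ≤ k - d * m) :
    ((pyCombos (c0 + 1) (k - d * m + d - 1) (d - 1 - 1)).map (fun rest => c0 :: rest)).map
        (fun pos => (pvGap (-1) pos ++ [(k - d * m + d - 1) - 1 - pos.getLastD (-1)]).map (· + m))
      = (multiindex_equal_alt (d - 1) (k - (m + c0)) m).map (fun a => (m + c0) :: a) := by
  have hd' : ¬ (d - 1 : Int) ≤ 0 := by omega
  have hmul : k - (m + c0) - (d - 1) * m = k - d * m - c0 := by ring
  have hS' : ¬ k - (m + c0) - (d - 1) * m < 0 := by rw [hmul]; omega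
  rw [alt_char (d - 1) (k - (m + c0)) m hd' hS']
  have hn' : k - (m + c0) - (d - 1) * m + (d - 1) - 1 = k - d * m + d - 1 - (c0 + 1) := by ring
  rw [hn']
  rw [pyCombos_shift (d - 2).toNat (d - 1 - 1) (c0 + 1) (k - d * m + d - 1) (by omega)]
  simp only [List.map_map]
  apply List.map_congr_left
  intro pos _
  simp only [Function.comp_apply]
  simp only [pvGap, List.getLastD_cons]
  rw [pvGap_shift pos c0 (c0 + 1), pvGetLastD_map_add pos c0 (c0 + 1)]
  have e1 : c0 - (c0 + 1) = -1 := by ring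
  rw [e1]
  simp only [List.map_cons, List.map_append, List.cons_append]
  ring_nf

-- B at dimension d-1 with zero slack: the single all-interior tuple
theorem pvFinal (d k m : Int) (hd : ¬ d ≤ 0) (hd1 : d ≠ 1) :
    multiindex_equal_alt (d - 1) (k - (m + (k - d * m))) m
      = [List.replicate (d - 1).toNat m] := by
  have hd' : ¬ (d - 1 : Int) ≤ 0 := by omega
  have hmul : k - (m + (k - d * m)) - (d - 1) * m = 0 := by ring
  have hS' : ¬ k - (m + (k - d * m)) - (d - 1) * m < 0 := by rw [hmul]; omega
  rw [alt_char (d - 1) (k - (m + (k - d * m))) m hd' hS']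
  have hn' : k - (m + (k - d * m)) - (d - 1) * m + (d - 1) - 1 = d - 2 := by ring
  rw [hn']
  have hr : (d - 1 - 1 : Int) = d - 2 := by ring
  rw [hr]
  rw [pyCombos_tight (d - 2).toNat (d - 2) rfl]
  simp only [List.map_cons, List.map_nil]
  have hgap := pvGap_consec (d - 2).toNat (-1) (d - 2) (by omega)
  have e0 : (-1 : Int) + 1 = 0 := by ring
  rw [e0] at hgap
  rw [hgap]
  have hlast : (d - 2 : Int) - 1 - (PySem.List.pyRange 0 (d - 2) 1).getLastD (-1) = 0 := by
    by_cases h2 : (2 : Int) < d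
    · rw [pvLast_pyRange 0 (d - 2) (-1) (by omega)]; ring
    · have hd2 : d = 2 := by omega
      subst hd2
      norm_num [PySem.List.pyRange_one_eq_nil, List.getLastD]
  rw [hlast]
  have hrep : List.replicate (d - 2).toNat (0 : Int) ++ [0] = List.replicate ((d - 2).toNat + 1) 0 := by
    rw [List.replicate_succ']
  rw [hrep]
  have hnat : (d - 2).toNat + 1 = (d - 1).toNat := by omega
  rw [hnat]
  rw [List.map_replicate]
  norm_num

-- the main induction: A's recursion produces exactly B's stars-and-bars list
theorem pvMain (N : Nat) : ∀ (d k m : Int), d.toNat = N →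
    multiindex_equal d k m = multiindex_equal_alt d k m := by
  induction N with
  | zero =>
      intro d k m hN
      have hd : d ≤ 0 := by omega
      rw [multiindex_equal]
      simp [hd, multiindex_equal_alt]
  | succ NN ih =>
      intro d k m hN
      have hd : ¬ d ≤ 0 := by omega
      by_cases hS : k - d * m < 0
      · -- empty on both sides
        have hlin : k - (d - 1) * m - m = k - d * m := by ring
        have hA : k - (d - 1) * m < m := by linarith [hS, hlin.ge, hlin.le]
        rw [multiindex_equal]
        simp only [hd, dif_neg, not_false_iff, hA, if_pos]
        unfold multiindex_equal_alt
        simp [hd, hS]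
      · rw [alt_char d k m hd hS]
        by_cases hd1 : d = 1
        · -- d = 1: the single tuple (k,)
          subst hd1
          rw [multiindex_equal]
          norm_num
          have hrec : ∀ i : Int, multiindex_equal 0 (k - i) m = [] := by
            intro i; rw [multiindex_equal]; norm_num
          simp only [hrec, List.map_nil]
          have hS1 : ¬ k - m < 0 := by
            have h1m : (1 : Int) * m = m := by ring
            rw [h1m] at hS; exact hS
          have hA1 : ¬ (k : Int) - 0 * m < m := by
            have h0 : (0 : Int) * m = 0 := by ring
            rw [h0]; omega
          rw [if_neg (show ¬ k < m by omega)]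
          rw [pyCombos]
          simp only [le_refl, dif_pos, List.map_cons, List.map_nil, pvGap, List.getLast?_nil,
            Option.getD_none, List.nil_append]
          have hflat : (PySem.List.pyRange m k 1).flatMap (fun _ : Int => ([] : List (List Int))) = [] := by
            simp
          rw [hflat, List.nil_append]
          have hk : k - m - 1 - (-1) + m = k := by ring
          rw [hk]
        · -- d ≥ 2: split off the last loop iteration / the last divider choice
          have hd2 : (2 : Int) ≤ d := by omega
          rw [multiindex_equal]
          simp only [hd, dif_neg, not_false_iff]
          have hlin : k - (d - 1) * m - m = k - d * m := by ring
          have hge : ¬ k - (d - 1) * m < m := by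
            intro hlt
            have : k - d * m < 0 := by linarith [hlin.le, hlin.ge]
            exact hS this
          simp only [hge, if_neg, not_false_iff]
          have hF : ∀ i : Int, multiindex_equal (d - 1) (k - i) m
              = multiindex_equal_alt (d - 1) (k - i) m := fun i =>
            ih (d - 1) (k - i) m (by omega)
          simp only [hF]
          -- unfold the outer layer of pyCombos on the right
          rw [pyCombos]
          have hr0 : ¬ (d - 1 : Int) ≤ 0 := by omega
          simp only [hr0, dif_neg, not_false_iff]
          have hub : k - d * m + d - 1 - (d - 1) + 1 = k - d * m + 1 := by ring
          rw [hub]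
          simp only [List.map_flatMap]
          -- replace each cell by B at dimension d-1
          have hcells : (PySem.List.pyRange 0 (k - d * m + 1) 1).flatMap (fun c0 =>
                ((pyCombos (c0 + 1) (k - d * m + d - 1) (d - 1 - 1)).map (fun rest => c0 :: rest)).map
                  (fun pos => (pvGap (-1) pos ++ [(k - d * m + d - 1) - 1 - pos.getLastD (-1)]).map (· + m)))
              = (PySem.List.pyRange 0 (k - d * m + 1) 1).flatMap (fun c0 =>
                (multiindex_equal_alt (d - 1) (k - (m + c0)) m).map (fun a => (m + c0) :: a)) := by
            apply List.flatMap_congr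
            intro c0 hc0mem
            have hmem := (PySem.List.mem_pyRange_one).mp hc0mem
            exact pvCell d k m c0 hd hd1 hmem.1 (Int.lt_add_one_iff.mp hmem.2)
          rw [hcells]
          -- split the last divider position off the range
          rw [PySem.List.pyRange_one_succ_right (by omega)]
          rw [List.flatMap_append]
          simp only [List.flatMap_cons, List.flatMap_nil, List.append_nil]
          rw [pvFinal d k m hd hd1]
          -- align the remaining ranges index-by-index
          have hrange : PySem.List.pyRange m (k - (d - 1) * m) 1
              = (PySem.List.pyRange 0 (k - d * m) 1).map (· + m) := by
            rw [pvRange_map_add]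
            have e1 : (0 : Int) + m = m := by ring
            have e2 : k - d * m + m = k - (d - 1) * m := by ring
            rw [e1, e2]
          rw [hrange, List.flatMap_map]
          congr 1
          · apply List.flatMap_congr
            intro c0 _
            rw [show c0 + m = m + c0 from by ring]
          · simp only [List.map_cons, List.map_nil]
            have e4 : m + (k - d * m) = k - (d - 1) * m := by ring
            rw [e4]

-- ===== VERDICT (by name: the statement is the Claim_ definition above) =====
theorem multiindex_equal_spec : Claim_equal_multiindex_equal := by
  intro d k interior _ _
  unfold Spec_multiindex_equal
  exact pvMain d.toNat d k interior rfl
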